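-- pv_equiv track=rewrite | github.com/hram/orienteering | portal/routers/race_results.py | _leader_split_seconds_by_split
-- ===== SOURCE A (Python) =====
-- def _leader_split_seconds_by_split(participants: list[dict]) -> list[int | None]:
--     split_count = max((len(participant.get("splits", [])) for participant in participants), default=0)
--     leader_seconds: list[int | None] = []
--     for split_index in range(split_count):
--         best_value = None
--         for participant in participants:
--             splits = participant.get("splits", [])
--             if split_index >= len(splits):
--                 continue
--             split_time = _split_stage_time(splits[split_index], split_index) or {}
--             seconds = split_time.get("seconds")
--             if seconds is None:
--                 continue
--             if best_value is None or seconds < best_value: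
--                 best_value = seconds
--         leader_seconds.append(best_value)
--     return leader_seconds
--
-- def _split_stage_time(split: dict, split_index: int) -> dict | None:
--     split_time = split.get("split")
--     if split_time:
--         return split_time
--     if split_index == 0:
--         return split.get("cumulative")
--     return None
-- ===== SOURCE B (Python) =====
-- def _stage_seconds(split: dict, index: int):
--     stage = split.get("split")
--     if not stage and index == 0:
--         stage = split.get("cumulative")
--     if not stage:
--         return None
--     return stage.get("seconds")
--
--
-- def _leader_split_seconds_by_split(participants: list[dict]) -> list[int | None]:
--     best: list[int | None] = []
--     for participant in participants:
--         splits = participant.get("splits", [])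
--         if len(splits) > len(best):
--             best += [None] * (len(splits) - len(best))
--         for index, split in enumerate(splits):
--             seconds = _stage_seconds(split, index)
--             if seconds is not None and (best[index] is None or seconds < best[index]):
--                 best[index] = seconds
--     return best
-- ===== Notes on version B (the rewrite author's own statement) =====
-- stated objective: alternative
-- what changed: Replaces A's split-index-major double loop (for each split index, rescan every participant and re-fetch its splits) with a single pass over each participant's split list that updates a per-index running-minimum array.
import Mathlib
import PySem

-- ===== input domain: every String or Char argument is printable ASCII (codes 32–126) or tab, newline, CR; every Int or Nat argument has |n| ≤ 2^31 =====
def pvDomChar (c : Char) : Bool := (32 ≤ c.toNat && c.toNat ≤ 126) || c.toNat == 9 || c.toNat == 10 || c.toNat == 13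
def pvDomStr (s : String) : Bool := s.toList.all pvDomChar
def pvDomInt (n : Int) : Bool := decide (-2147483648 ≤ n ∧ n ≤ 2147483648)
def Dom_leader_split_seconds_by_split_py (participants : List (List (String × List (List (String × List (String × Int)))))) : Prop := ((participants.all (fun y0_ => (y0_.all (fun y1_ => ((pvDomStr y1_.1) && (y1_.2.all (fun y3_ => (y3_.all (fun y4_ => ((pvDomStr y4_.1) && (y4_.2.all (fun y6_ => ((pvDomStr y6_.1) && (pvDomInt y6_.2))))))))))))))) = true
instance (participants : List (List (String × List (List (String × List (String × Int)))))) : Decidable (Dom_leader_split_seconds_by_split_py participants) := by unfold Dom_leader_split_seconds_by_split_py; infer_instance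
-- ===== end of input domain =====

-- B replaces A's split-index-major double loop by one pass over each participant's
-- splits updating a per-index running-minimum array (objective: alternative).

-- a participant is a dict; a split is a dict of dicts of ints
abbrev PvSplit : Type := List (String × List (String × Int))

-- ===== PORT A =====
-- port of _split_stage_time (truthiness of a dict = non-empty item list)
def pv_split_stage_time (split : PvSplit) (split_index : Int) : Option (List (String × Int)) :=
  let split_time := PySem.Dict.get? (PySem.Dict.mk split) "split"
  if split_time.getD [] ≠ [] then split_time
  else if split_index = 0 then PySem.Dict.get? (PySem.Dict.mk split) "cumulative"
  else none

def leader_split_seconds_by_split_py (participants : List (List (String × List (List (String × List (String × Int)))))) : List (Option Int) :=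
  let split_count : Int :=
    PySem.List.maxD (participants.map (fun p => PySem.List.len ((PySem.Dict.mk p).getD "splits" []))) (fun x => x) 0
  (PySem.List.pyRange 0 split_count 1).foldl (fun leader_seconds split_index =>
    let best_value : Option Int :=
      participants.foldl (fun best_value participant =>
        let splits := (PySem.Dict.mk participant).getD "splits" []
        if split_index ≥ PySem.List.len splits then best_value
        else
          match PySem.List.pyGet? splits split_index with
          | none => best_value  -- unreachable: the guard above keeps the index in range
          | some split =>
            -- `_split_stage_time(...) or {}` followed by `.get("seconds")`
            let split_time := (pv_split_stage_time split split_index).getD []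
            match PySem.Dict.get? (PySem.Dict.mk split_time) "seconds" with
            | none => best_value
            | some seconds =>
              match best_value with
              | none => some seconds
              | some b => if seconds < b then some seconds else best_value) none
    leader_seconds ++ [best_value]) []

-- ===== PORT B =====
-- port of _stage_seconds from Source B
def pv_stage_seconds (split : PvSplit) (index : Nat) : Option Int :=
  let stage0 := PySem.Dict.get? (PySem.Dict.mk split) "split"
  let stage := if stage0.getD [] = [] ∧ index = 0 then PySem.Dict.get? (PySem.Dict.mk split) "cumulative" else stage0
  if stage.getD [] = [] then none
  else PySem.Dict.get? (PySem.Dict.mk (stage.getD [])) "seconds"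

-- the `for index, split in enumerate(splits)` loop; `index` stays < best.length,
-- so Python's in-range best[index] read is List.getD and the write is List.set
def pv_upd_loop (index : Nat) (splits : List PvSplit) (best : List (Option Int)) : List (Option Int) :=
  match splits with
  | [] => best
  | split :: rest =>
    let best' :=
      match pv_stage_seconds split index with
      | none => best
      | some seconds =>
        match best.getD index none with
        | none => best.set index (some seconds)
        | some b => if seconds < b then best.set index (some seconds) else best
    pv_upd_loop (index + 1) rest best'

def leader_split_seconds_by_split_py_alt (participants : List (List (String × List (List (String × List (String × Int)))))) : List (Option Int) :=
  participants.foldl (fun best participant =>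
    let splits := (PySem.Dict.mk participant).getD "splits" []
    let best := if best.length < splits.length then best ++ List.replicate (splits.length - best.length) none else best
    pv_upd_loop 0 splits best) []

-- ===== PRECONDITION & SPEC =====
def Spec_leader_split_seconds_by_split_py (participants : List (List (String × List (List (String × List (String × Int)))))) (out : List (Option Int)) : Prop := out = leader_split_seconds_by_split_py_alt participants
instance (participants : List (List (String × List (List (String × List (String × Int)))))) (out : List (Option Int)) : Decidable (Spec_leader_split_seconds_by_split_py participants out) := by unfold Spec_leader_split_seconds_by_split_py; infer_instance

-- ===== CLAIM (what is proved, stated in full; the proofs are below) =====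
def Claim_equal_leader_split_seconds_by_split_py : Prop := ∀ (participants : List (List (String × List (List (String × List (String × Int)))))), Dom_leader_split_seconds_by_split_py participants → Spec_leader_split_seconds_by_split_py participants (leader_split_seconds_by_split_py participants)

-- ===== LEMMAS AND PROOFS =====

abbrev PvParticipant : Type := List (String × List PvSplit)

def pvSplits (p : PvParticipant) : List PvSplit := (PySem.Dict.mk p).getD "splits" []

def pvMaxLen (ps : List PvParticipant) : Nat :=
  ps.foldl (fun m p => max m (pvSplits p).length) 0

def pvCombine (cur s? : Option Int) : Option Int :=
  match s? with
  | none => cur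
  | some s =>
    match cur with
    | none => some s
    | some b => if s < b then some s else cur

def pvSecA (split : PvSplit) (i : Int) : Option Int :=
  PySem.Dict.get? (PySem.Dict.mk ((pv_split_stage_time split i).getD [])) "seconds"

def pvBestAt (ps : List PvParticipant) (i : Nat) : Option Int :=
  ps.foldl (fun cur p =>
    if (pvSplits p).length ≤ i then cur
    else pvCombine cur (pvSecA ((pvSplits p).getD i []) (i : Int))) none

-- B's inlined stage-time logiccomputes the same seconds as A's helper chain
lemma pv_secs (split : PvSplit) (i : Nat) :
    pv_stage_seconds split i = pvSecA split (i : Int) := by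
  unfold pv_stage_seconds pvSecA pv_split_stage_time
  by_cases h1 : (PySem.Dict.get? (PySem.Dict.mk split) "split").getD [] = []
  · by_cases h2 : i = 0
    · subst h2
      by_cases h3 : (PySem.Dict.get? (PySem.Dict.mk split) "cumulative").getD [] = []
      · simp [h1, h3]
        rfl
      · simp [h1, h3]
    · simp [h1, h2]
      rfl
  · simp [h1]

-- indices at or beyond every participant's split count carry no value
lemma pv_bestAt_none (ps : List PvParticipant) (i : Nat) (h : pvMaxLen ps ≤ i) :
    pvBestAt ps i = none := by
  unfold pvBestAt
  rw [PySem.List.foldl_congr_mem ps _ (fun cur _ => cur) none ?_]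
  · exact PySem.List.foldl_ignore ps none
  · intro acc p hp
    have := (PySem.List.le_foldl_max_nat ps (fun p => (pvSplits p).length) 0).2 p hp
    have hle : (pvSplits p).length ≤ i := le_trans this h
    simp [hle]

lemma pv_max_getD (xs : List Int) (h : ∀ x ∈ xs, 0 ≤ x) :
    (PySem.List.max? xs (fun x => x)).getD 0 = xs.foldl max 0 := by
  cases xs with
  | nil => rfl
  | cons x t =>
    rw [PySem.List.max?_id_cons]
    simp only [List.foldl_cons, Option.getD_some]
    rw [max_eq_right (h x (by simp))]

lemma pv_foldl_max_cast (ps : List PvParticipant) (m : Nat) :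
    ps.foldl (fun acc p => max acc (PySem.List.len ((PySem.Dict.mk p).getD "splits" []))) (m : Int)
      = ((ps.foldl (fun acc p => max acc (pvSplits p).length) m : Nat) : Int) := by
  induction ps generalizing m with
  | nil => rfl
  | cons p t ih =>
    simp only [List.foldl_cons]
    rw [show max (m : Int) (PySem.List.len ((PySem.Dict.mk p).getD "splits" []))
          = ((max m (pvSplits p).length : Nat) : Int) by
        simp [PySem.List.len_eq, pvSplits, Nat.cast_max]]
    exact ih _

-- A's split_count is pvMaxLen
lemma pv_split_count (ps : List PvParticipant) :
    PySem.List.maxD (ps.map (fun p => PySem.List.len ((PySem.Dict.mk p).getD "splits" []))) (fun x => x) 0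
      = (pvMaxLen ps : Int) := by
  have hpos : ∀ x ∈ ps.map (fun p => PySem.List.len ((PySem.Dict.mk p).getD "splits" [])), (0:Int) ≤ x := by
    intro x hx
    simp only [List.mem_map] at hx
    obtain ⟨p, hp, rfl⟩ := hx
    simp [PySem.List.len_eq]
  unfold PySem.List.maxD
  rw [pv_max_getD _ hpos, List.foldl_map]
  exact pv_foldl_max_cast ps 0

-- characterisation of port A
lemma pv_A_eq (ps : List PvParticipant) :
    leader_split_seconds_by_split_py ps = (List.range (pvMaxLen ps)).map (pvBestAt ps) := by
  simp only [leader_split_seconds_by_split_py]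
  rw [pv_split_count, PySem.List.pyRange_zero_nat, PySem.List.foldl_append_singleton_eq_map,
      List.nil_append, List.map_map]
  apply List.map_congr_left
  intro i _
  simp only [Function.comp_apply]
  unfold pvBestAt
  apply PySem.List.foldl_congr_mem
  intro acc p _
  by_cases hle : ((PySem.Dict.mk p).getD "splits" []).length ≤ i
  · rw [if_pos (show (i:Int) ≥ PySem.List.len ((PySem.Dict.mk p).getD "splits" []) by
        simp only [PySem.List.len_eq]; omega),
        if_pos (show (pvSplits p).length ≤ i from hle)]
  · have hlt : i < ((PySem.Dict.mk p).getD "splits" []).length := by omega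
    rw [if_neg (show ¬ ((i:Int) ≥ PySem.List.len ((PySem.Dict.mk p).getD "splits" [])) by
        simp only [PySem.List.len_eq]; omega),
        if_neg (show ¬ ((pvSplits p).length ≤ i) from by simp only [pvSplits]; omega),
        PySem.List.pyGet?_natCast, List.getElem?_eq_getElem hlt,
        show (pvSplits p).getD i [] = ((PySem.Dict.mk p).getD "splits" [])[i] from by
          simp [pvSplits, List.getD, List.getElem?_eq_getElem hlt]]
    rfl

-- setting index k of a mapped range rewrites the function at k
lemma pv_set_map_range (M k : Nat) (g : Nat → Option Int) (v : Option Int) :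
    ((List.range M).map g).set k v = (List.range M).map (fun i => if i = k then v else g i) := by
  apply List.ext_getElem
  · simp
  · intro i h1 h2
    simp only [List.getElem_set, List.getElem_map, List.getElem_range]
    rcases eq_or_ne k i with h | h
    · subst h; simp
    · simp [h, Ne.symm h]

lemma pv_getD_map_range (M : Nat) (g : Nat → Option Int) (i : Nat) :
    ((List.range M).map g).getD i none = if i < M then g i else none := by
  by_cases h : i < M
  · rw [List.getD, List.getElem?_eq_getElem (by simpa using h)]
    simp [h]
  · rw [List.getD, List.getElem?_eq_none (by simpa using h)]
    simp [h]

-- the enumerate loop updates exactly the indices k .. k+|splits|-1 of the min array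
lemma pv_updLoop (splits : List PvSplit) (k M : Nat) (g : Nat → Option Int)
    (hM : k + splits.length ≤ M) :
    pv_upd_loop k splits ((List.range M).map g) =
      (List.range M).map (fun i =>
        if k ≤ i ∧ i < k + splits.length
        then pvCombine (g i) (pv_stage_seconds (splits.getD (i - k) []) i)
        else g i) := by
  induction splits generalizing k g with
  | nil =>
    simp only [pv_upd_loop]
    apply List.map_congr_left
    intro i _
    rw [if_neg (show ¬ (k ≤ i ∧ i < k + ([] : List PvSplit).length) by
      simp only [List.length_nil]; omega)]
  | cons s rest ih =>
    have hkM : k < M := by simp only [List.length_cons] at hM; omega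
    show pv_upd_loop (k + 1) rest
        (match pv_stage_seconds s k with
          | none => (List.range M).map g
          | some seconds =>
            match ((List.range M).map g).getD k none with
            | none => ((List.range M).map g).set k (some seconds)
            | some b => if seconds < b then ((List.range M).map g).set k (some seconds)
                        else (List.range M).map g) = _
    have hbest' : (match pv_stage_seconds s k with
          | none => (List.range M).map g
          | some seconds =>
            match ((List.range M).map g).getD k none with
            | none => ((List.range M).map g).set k (some seconds)
            | some b => if seconds < b then ((List.range M).map g).set k (some seconds)
                        else (List.range M).map g)
        = (List.range M).map (fun i => if i = k then pvCombine (g k) (pv_stage_seconds s k) else g i) := by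
      rw [pv_getD_map_range M g k, if_pos hkM]
      cases hs : pv_stage_seconds s k with
      | none =>
        show (List.range M).map g = _
        apply List.map_congr_left
        intro i _
        by_cases h : i = k
        · subst h; simp [pvCombine]
        · simp [h]
      | some sec =>
        cases hk : g k with
        | none =>
          show ((List.range M).map g).set k (some sec) = _
          rw [pv_set_map_range]
          apply List.map_congr_left
          intro i _
          by_cases h : i = k
          · subst h; simp [pvCombine]
          · simp [h]
        | some b =>
          show (if sec < b then ((List.range M).map g).set k (some sec) else (List.range M).map g) = _
          split_ifs with hlt
          · rw [pv_set_map_range]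
            apply List.map_congr_left
            intro i _
            by_cases h : i = k
            · subst h; simp [pvCombine, hlt]
            · simp [h]
          · apply List.map_congr_left
            intro i _
            by_cases h : i = k
            · subst h; simp [pvCombine, hlt, hk]
            · simp [h]
    rw [hbest', ih (k + 1) _ (by simp only [List.length_cons] at hM; omega)]
    apply List.map_congr_left
    intro i _
    by_cases h1 : i = k
    · rw [h1]
      rw [if_neg (show ¬ (k + 1 ≤ k ∧ k < k + 1 + rest.length) by omega),
          if_pos (rfl : k = k),
          if_pos (show k ≤ k ∧ k < k + (s :: rest).length by simp only [List.length_cons]; omega)]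
      simp
    · by_cases h2 : k + 1 ≤ i ∧ i < k + 1 + rest.length
      · rw [if_pos h2, if_neg h1,
            if_pos (show k ≤ i ∧ i < k + (s :: rest).length by simp only [List.length_cons]; omega)]
        have h3 : i - k = (i - (k + 1)) + 1 := by omega
        rw [h3]
        simp
      · rw [if_neg h2, if_neg h1,
            if_neg (show ¬ (k ≤ i ∧ i < k + (s :: rest).length) by simp only [List.length_cons]; omega)]

-- extending the min array with None entries extends the mapped range
lemma pv_ext (L n : Nat) (g : Nat → Option Int) (hg : ∀ i, L ≤ i → g i = none) (h : L < n) :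
    (List.range L).map g ++ List.replicate (n - L) none = (List.range (max L n)).map g := by
  rw [max_eq_right (le_of_lt h)]
  have hsplit : n = L + (n - L) := by omega
  rw [hsplit, List.range_add, List.map_append, List.map_map]
  congr 1
  symm
  apply List.eq_replicate_iff.mpr
  constructor
  · simp
  · intro b hb
    simp only [List.mem_map, List.mem_range, Function.comp] at hb
    obtain ⟨x, _, rfl⟩ := hb
    exact hg _ (by omega)

-- characterisation of port B
lemma pv_B_eq (ps : List PvParticipant) :
    leader_split_seconds_by_split_py_alt ps = (List.range (pvMaxLen ps)).map (pvBestAt ps) := by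
  induction ps using List.reverseRecOn with
  | nil => rfl
  | append_singleton ps p ih =>
    simp only [leader_split_seconds_by_split_py_alt] at ih ⊢
    simp only [List.foldl_append, List.foldl_cons, List.foldl_nil, ih]
    have hgnone : ∀ i, pvMaxLen ps ≤ i → pvBestAt ps i = none := fun i hi => pv_bestAt_none ps i hi
    have hlen : ((List.range (pvMaxLen ps)).map (pvBestAt ps)).length = pvMaxLen ps := by simp
    have hext : (if ((List.range (pvMaxLen ps)).map (pvBestAt ps)).length < ((PySem.Dict.mk p).getD "splits" []).length
                 then (List.range (pvMaxLen ps)).map (pvBestAt ps) ++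
                      List.replicate (((PySem.Dict.mk p).getD "splits" []).length - ((List.range (pvMaxLen ps)).map (pvBestAt ps)).length) none
                 else (List.range (pvMaxLen ps)).map (pvBestAt ps))
        = (List.range (max (pvMaxLen ps) ((PySem.Dict.mk p).getD "splits" []).length)).map (pvBestAt ps) := by
      rw [hlen]
      by_cases h : pvMaxLen ps < ((PySem.Dict.mk p).getD "splits" []).length
      · rw [if_pos h]
        exact pv_ext _ _ _ hgnone h
      · rw [if_neg h, max_eq_left (by omega)]
    rw [hext, pv_updLoop ((PySem.Dict.mk p).getD "splits" []) 0
          (max (pvMaxLen ps) ((PySem.Dict.mk p).getD "splits" []).length) (pvBestAt ps) (by omega)]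
    have hmax : pvMaxLen (ps ++ [p])
        = max (pvMaxLen ps) ((PySem.Dict.mk p).getD "splits" []).length := by
      simp only [pvMaxLen, List.foldl_append, List.foldl_cons, List.foldl_nil, pvSplits]
    rw [hmax]
    apply List.map_congr_left
    intro i _
    rw [show pvBestAt (ps ++ [p]) i
        = (if (pvSplits p).length ≤ i then pvBestAt ps i
           else pvCombine (pvBestAt ps i) (pvSecA ((pvSplits p).getD i []) (i : Int))) from by
      simp only [pvBestAt, List.foldl_append, List.foldl_cons, List.foldl_nil]]
    by_cases h : i < ((PySem.Dict.mk p).getD "splits" []).length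
    · rw [if_pos (show 0 ≤ i ∧ i < 0 + ((PySem.Dict.mk p).getD "splits" []).length by omega),
          if_neg (show ¬ ((pvSplits p).length ≤ i) from by simp only [pvSplits]; omega),
          pv_secs]
      simp only [Nat.sub_zero, pvSplits]
    · rw [if_neg (show ¬ (0 ≤ i ∧ i < 0 + ((PySem.Dict.mk p).getD "splits" []).length) by omega),
          if_pos (show (pvSplits p).length ≤ i from by simp only [pvSplits]; omega)]

-- ===== VERDICT (by name: the statement is the Claim_ definition above) =====
theorem leader_split_seconds_by_split_py_spec : Claim_equal_leader_split_seconds_by_split_py := by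
  intro participants _
  unfold Spec_leader_split_seconds_by_split_py
  rw [pv_A_eq, pv_B_eq]
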